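-- pv_equiv track=rewrite | github.com/tasicaca/Diplomski-elfak | 11.1.2024.DetektujeKontaktSaIvicamaNaOsnovuVideaSaIvicamaF1.py | dodirujeBelu
-- ===== SOURCE A (Python) =====
-- def dodirujeBelu(hsv_pixel):
--     # hsv vrednosti okolnih piksela se analiziraju kako bi se utvrdilo
--     # da li je yolo objekat došao u zonu potpuno belih piksela kojima su obelezni ivicnjaci
--     radius = 2   #6 daje dva za madjarsku
--     tolerance = 10 #10 daje dva za madjarsku
--     h_center, s_center, v_center = hsv_pixel
--     is_almost_white = False
--
--     # Provera da li su pikseli u neposrednoj okolini beli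
--     for h in range(h_center - radius, h_center + radius + 1):
--         for s in range(s_center - radius, s_center + radius + 1):
--             for v in range(v_center - radius, v_center + radius + 1):
--                 # Uvedena je tolerancija zbog nepreciznosti detekcije yolo objekta
--                 is_almost_white = (abs(h - 0) <= tolerance or abs(s - 0) <= tolerance or abs(v - 255) <= tolerance)
--
--                 if is_almost_white:
--                     return True  # Pronadjen piksel, vraca se true
--
--     return False  # Nema potencijalnih kandidata u blizini
-- ===== SOURCE B (Python) =====
-- def dodirujeBelu(hsv_pixel):
--     # Closed form: the triple scan is True iff some component's +/-2 window
--     # meets its target band, i.e. an interval-intersection test per component.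
--     h_center, s_center, v_center = hsv_pixel
--     return (-12 <= h_center <= 12) or (-12 <= s_center <= 12) or (243 <= v_center <= 267)
-- ===== Notes on version B (the rewrite author's own statement) =====
-- stated objective: simpler
-- what changed: Replaced the triple nested range scan (125 iterations) by a closed-form interval-intersection test on each HSV component.
import Mathlib
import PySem

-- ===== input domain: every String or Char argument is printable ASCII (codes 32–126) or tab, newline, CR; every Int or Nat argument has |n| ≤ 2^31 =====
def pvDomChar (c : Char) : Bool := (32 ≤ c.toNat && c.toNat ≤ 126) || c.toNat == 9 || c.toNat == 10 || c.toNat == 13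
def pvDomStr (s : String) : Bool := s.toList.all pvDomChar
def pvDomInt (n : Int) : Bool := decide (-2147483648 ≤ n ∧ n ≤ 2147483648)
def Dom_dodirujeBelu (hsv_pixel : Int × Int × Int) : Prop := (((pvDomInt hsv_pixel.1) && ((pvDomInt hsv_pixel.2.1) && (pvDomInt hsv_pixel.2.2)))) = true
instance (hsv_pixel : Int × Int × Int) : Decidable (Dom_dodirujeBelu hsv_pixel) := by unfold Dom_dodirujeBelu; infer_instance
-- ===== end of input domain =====

-- B replaces A's 125-iteration triple range scan by a closed-form per-component
-- interval-intersection test (objective: simpler).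

-- ===== PORT A =====
def dodirujeBelu (hsv_pixel : Int × Int × Int) : Bool :=
  let radius : Int := 2
  let tolerance : Int := 10
  let (h_center, s_center, v_center) := hsv_pixel
  -- early return on first match = List.any over the three nested ranges
  (PySem.List.pyRange (h_center - radius) (h_center + radius + 1) 1).any fun h =>
    (PySem.List.pyRange (s_center - radius) (s_center + radius + 1) 1).any fun s =>
      (PySem.List.pyRange (v_center - radius) (v_center + radius + 1) 1).any fun v =>
        decide (|h - 0| ≤ tolerance) || decide (|s - 0| ≤ tolerance) || decide (|v - 255| ≤ tolerance)

-- ===== PORT B =====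
def dodirujeBelu_alt (hsv_pixel : Int × Int × Int) : Bool :=
  let (h_center, s_center, v_center) := hsv_pixel
  decide (-12 ≤ h_center ∧ h_center ≤ 12) ||
  decide (-12 ≤ s_center ∧ s_center ≤ 12) ||
  decide (243 ≤ v_center ∧ v_center ≤ 267)

-- ===== PRECONDITION & SPEC =====
def Spec_dodirujeBelu (hsv_pixel : Int × Int × Int) (out : Bool) : Prop := out = dodirujeBelu_alt hsv_pixel
instance (hsv_pixel : Int × Int × Int) (out : Bool) : Decidable (Spec_dodirujeBelu hsv_pixel out) := by unfold Spec_dodirujeBelu; infer_instance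

-- ===== CLAIM (what is proved, stated in full; the proofs are below) =====
def Claim_equal_dodirujeBelu : Prop := ∀ (hsv_pixel : Int × Int × Int), Dom_dodirujeBelu hsv_pixel → Spec_dodirujeBelu hsv_pixel (dodirujeBelu hsv_pixel)

-- ===== LEMMAS AND PROOFS =====

-- ===== VERDICT (by name: the statement is the Claim_ definition above) =====
theorem dodirujeBelu_spec : Claim_equal_dodirujeBelu := by
  intro ⟨hc, sc, vc⟩ _
  unfold Spec_dodirujeBelu dodirujeBelu dodirujeBelu_alt
  rw [Bool.eq_iff_iff]
  simp only [List.any_eq_true, PySem.List.mem_pyRange_one, Bool.or_eq_true,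
    decide_eq_true_eq, abs_le]
  constructor
  · rintro ⟨h, hh, s, hs, v, hv, hcond⟩
    omega
  · intro hcond
    exact ⟨min (hc + 2) (max (hc - 2) 0), by omega,
           min (sc + 2) (max (sc - 2) 0), by omega,
           min (vc + 2) (max (vc - 2) 255), by omega, by omega⟩
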